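-- pv_equiv track=rewrite | github.com/KarlWang/LMEL-ResearchProject-2025 | MultiSatellitesNego/utils.py | format_coverage_array
-- ===== SOURCE A (Python) =====
-- def format_coverage_array(coverage):
--     """
--     Formats a coverage array with 8 elements per row for better readability.
--
--     Args:
--         coverage (list): 96-element coverage array
--
--     Returns:
--         str: Formatted string with 8 elements per row, comma-separated, with trailing commas except for the last row
--     """
--     rows = []
--     for i in range(0, len(coverage), 8):
--         row = coverage[i:i+8]
--         # Add trailing comma for all rows except the last one
--         if i + 8 < len(coverage):
--             rows.append(",".join(map(str, row)) + ",")
--         else: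
--             rows.append(",".join(map(str, row)))
--     return "\n".join(rows)
-- ===== SOURCE B (Python) =====
-- def format_coverage_array(coverage):
--     parts = []
--     for i, val in enumerate(coverage):
--         if i == 0:
--             piece = str(val)
--         elif i % 8 == 0:
--             piece = ",\n" + str(val)
--         else:
--             piece = "," + str(val)
--         parts.append(piece)
--     return "".join(parts)
-- ===== Notes on version B (the rewrite author's own statement) =====
-- stated objective: alternative
-- what changed: Instead of slicing the list into rows of 8, joining each row with ',' and joining rows with '\n' (with a conditional trailing comma), B makes one flat pass with enumerate and emits a per-element separator chosen by an index-mod-8 test ('' before index 0, ',\n' at positive multiples of 8, ',' otherwise), joining the pieces once at the end.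
import Mathlib
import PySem

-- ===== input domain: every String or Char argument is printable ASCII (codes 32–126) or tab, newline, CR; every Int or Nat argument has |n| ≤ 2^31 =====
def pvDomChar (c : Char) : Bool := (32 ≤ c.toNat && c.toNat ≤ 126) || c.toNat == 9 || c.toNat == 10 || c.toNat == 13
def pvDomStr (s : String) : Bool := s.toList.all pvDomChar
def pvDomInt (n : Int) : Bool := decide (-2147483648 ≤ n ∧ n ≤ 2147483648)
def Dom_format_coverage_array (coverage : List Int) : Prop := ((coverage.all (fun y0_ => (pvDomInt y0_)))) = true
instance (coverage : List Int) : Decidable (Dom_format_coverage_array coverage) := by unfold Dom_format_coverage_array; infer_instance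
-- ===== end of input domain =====

-- B replaces A's slice-into-rows-of-8/join-rows structure by a single flat pass with
-- per-element separators chosen by an index-mod-8 test (objective: alternative decomposition).

-- ===== PORT A =====
def format_coverage_array (coverage : List Int) : String :=
  let n : Int := coverage.length
  let rows := (PySem.List.pyRange 0 n 8).foldl
    (fun rows i =>
      let row := PySem.List.slice coverage (some i) (some (i + 8))
      if i + 8 < n then
        rows ++ [PySem.Str.join "," (row.map PySem.Int.toStr) ++ ","]
      else
        rows ++ [PySem.Str.join "," (row.map PySem.Int.toStr)])
    []
  PySem.Str.join "\n" rows

-- ===== PORT B =====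
def pvPiece (i : Int) (val : Int) : String :=
  if i = 0 then PySem.Int.toStr val
  else if PySem.Int.mod i 8 = 0 then ",\n" ++ PySem.Int.toStr val
  else "," ++ PySem.Int.toStr val

def format_coverage_array_alt (coverage : List Int) : String :=
  let parts := (PySem.List.enumerate coverage).foldl
    (fun parts p => parts ++ [pvPiece p.1 p.2]) []
  PySem.Str.join "" parts

-- ===== PRECONDITION & SPEC =====
def Spec_format_coverage_array (coverage : List Int) (out : String) : Prop := out = format_coverage_array_alt coverage
instance (coverage : List Int) (out : String) : Decidable (Spec_format_coverage_array coverage out) := by unfold Spec_format_coverage_array; infer_instance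

-- ===== CLAIM (what is proved, stated in full; the proofs are below) =====
def Claim_equal_format_coverage_array : Prop := ∀ (coverage : List Int), Dom_format_coverage_array coverage → Spec_format_coverage_array coverage (format_coverage_array coverage)

-- ===== LEMMAS AND PROOFS =====

-- the common shape both ports produce, chunk-wise (proof helper only)
def pvRowC (l : List Int) : List Char :=
  PySem.Chars.join [','] (l.map PySem.Int.toChars)

def pvFmt (l : List Int) : List Char :=
  if l.length ≤ 8 then pvRowC l
  else pvRowC (l.take 8) ++ [',', '\n'] ++ pvFmt (l.drop 8)
termination_by l.length
decreasing_by simp; omega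

theorem pvFmt_small (l : List Int) (h : l.length ≤ 8) : pvFmt l = pvRowC l := by
  rw [pvFmt]; simp [h]

theorem pvFmt_big (l : List Int) (h : ¬ l.length ≤ 8) :
    pvFmt l = pvRowC (l.take 8) ++ [',', '\n'] ++ pvFmt (l.drop 8) := by
  rw [pvFmt]; simp [h]

theorem pvJoin_nil_sep (l : List (List Char)) : PySem.Chars.join [] l = l.flatten := by
  induction l with
  | nil => simp [PySem.Chars.join_nil]
  | cons a t ih =>
    cases t with
    | nil => simp [PySem.Chars.join_singleton]
    | cons b r => rw [PySem.Chars.join_cons_cons]; simp_all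

theorem pvEnumerate_append {α : Type} (xs ys : List α) (s : Int) :
    PySem.List.enumerate (xs ++ ys) s
      = PySem.List.enumerate xs s ++ PySem.List.enumerate ys (s + xs.length) := by
  induction xs generalizing s with
  | nil => simp [PySem.List.enumerate_nil]
  | cons a t ih =>
    simp only [List.cons_append, PySem.List.enumerate_cons, ih (s + 1), List.length_cons]
    push_cast
    ring_nf

theorem pvRowC_cons (x : Int) (xs : List Int) :
    pvRowC (x :: xs)
      = PySem.Int.toChars x ++ (xs.map (fun v => ',' :: PySem.Int.toChars v)).flatten := by
  induction xs generalizing x with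
  | nil => simp [pvRowC, PySem.Chars.join_singleton]
  | cons b t ih =>
    have h1 : pvRowC (x :: b :: t)
        = PySem.Int.toChars x ++ [','] ++ pvRowC (b :: t) := by
      simp [pvRowC, PySem.Chars.join_cons_cons]
    rw [h1, ih b]
    simp

theorem pvPiece_toList_mid (i v : Int) (h0 : ¬ i = 0) (h8 : ¬ PySem.Int.mod i 8 = 0) :
    (pvPiece i v).toList = ',' :: PySem.Int.toChars v := by
  unfold pvPiece
  rw [if_neg h0, if_neg h8]
  simp [PySem.Int.toList_toStr]

-- inner run of a chunk: indices s, s+1, …, never 0 and never ≡ 0 (mod 8)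
theorem pvInner (xs : List Int) (s : Int)
    (h : ∀ k : Nat, k < xs.length → ¬ (s + k = 0) ∧ ¬ PySem.Int.mod (s + k) 8 = 0) :
    ((PySem.List.enumerate xs s).map (fun p => (pvPiece p.1 p.2).toList)).flatten
      = (xs.map (fun v => ',' :: PySem.Int.toChars v)).flatten := by
  induction xs generalizing s with
  | nil => simp [PySem.List.enumerate_nil]
  | cons a t ih =>
    have h0 := h 0 (by simp)
    simp only [Int.natCast_zero, add_zero] at h0
    rw [PySem.List.enumerate_cons]
    simp only [List.map_cons, List.flatten_cons]
    rw [pvPiece_toList_mid s a h0.1 h0.2, ih (s + 1) ?_]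
    intro k hk
    have h' := h (k + 1) (by simp; omega)
    constructor
    · intro hc; apply h'.1; push_cast at hc ⊢; omega
    · intro hc; apply h'.2; rw [← hc]; congr 1; push_cast; omega

theorem pvMod8_mul (j : Nat) : PySem.Int.mod (8 * (j : Int)) 8 = 0 := by
  rw [PySem.Int.mod_eq_zero_iff_dvd]; exact ⟨j, rfl⟩

-- one chunk on the B side: the first element carries the separator
theorem pvChunkB (x : Int) (xs : List Int) (j : Nat) (hlen : xs.length ≤ 7) :
    ((PySem.List.enumerate (x :: xs) (8 * (j : Int))).map (fun p => (pvPiece p.1 p.2).toList)).flatten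
      = (if j = 0 then [] else [',', '\n']) ++ pvRowC (x :: xs) := by
  rw [PySem.List.enumerate_cons]
  simp only [List.map_cons, List.flatten_cons]
  rw [pvInner xs (8 * (j : Int) + 1) ?_]
  · rw [pvRowC_cons]
    by_cases hj : j = 0
    · subst hj
      simp [pvPiece, PySem.Int.toList_toStr]
    · have hj0 : ¬ (8 * (j : Int) = 0) := by
        intro hc; apply hj; omega
      unfold pvPiece
      rw [if_neg hj0, if_pos (pvMod8_mul j)]
      simp [hj, PySem.Int.toList_toStr]
  · intro k hk
    have hk7 : (k : Int) ≤ 6 := by exact_mod_cast Int.ofNat_le.mpr (by omega)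
    constructor
    · intro hc; omega
    · intro hc
      rw [PySem.Int.mod_eq_zero_iff_dvd] at hc
      obtain ⟨c, hcc⟩ := hc
      omega

-- B side, chunk-wise recursion
theorem pvB_main : ∀ (m : Nat) (cov : List Int), cov.length ≤ m → ∀ (j : Nat),
    ((PySem.List.enumerate cov (8 * (j : Int))).map (fun p => (pvPiece p.1 p.2).toList)).flatten
      = (if j = 0 ∨ cov = [] then [] else [',', '\n']) ++ pvFmt cov := by
  intro m
  induction m with
  | zero =>
    intro cov hcov j
    have : cov = [] := List.eq_nil_of_length_eq_zero (by omega)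
    subst this
    simp [PySem.List.enumerate_nil, pvFmt_small, pvRowC, PySem.Chars.join_nil]
  | succ m ih =>
    intro cov hcov j
    cases cov with
    | nil => simp [PySem.List.enumerate_nil, pvFmt_small, pvRowC, PySem.Chars.join_nil]
    | cons x rest =>
      by_cases hs : (x :: rest).length ≤ 8
      · rw [pvChunkB x rest j (by simp at hs; omega), pvFmt_small _ hs]
        simp
      · -- split into the first chunk and the remainder
        have hsplit : x :: rest = (x :: rest).take 8 ++ (x :: rest).drop 8 := by
          simp
        have hlen8 : ((x :: rest).take 8).length = 8 := by
          simp at hs ⊢; omega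
        conv_lhs => rw [hsplit]
        rw [pvEnumerate_append, List.map_append, List.flatten_append, hlen8]
        have hcast : (8 * (j : Int) + (8 : Nat)) = 8 * ((j + 1 : Nat) : Int) := by
          push_cast; ring
        rw [hcast]
        have htake : (x :: rest).take 8 = x :: rest.take 7 := by simp
        rw [htake, pvChunkB x (rest.take 7) j (by simp)]
        rw [ih ((x :: rest).drop 8)
            (by simp only [List.length_drop, List.length_cons] at hcov ⊢; omega) (j + 1)]
        have hdrop_ne : ¬ ((x :: rest).drop 8 = []) := by
          intro hc
          have := congrArg List.length hc
          simp at this hs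
          omega
        rw [pvFmt_big _ hs, htake]
        have h7 : ¬ rest.length ≤ 7 := by simp at hs; omega
        simp [List.append_assoc, h7]

-- fold-with-append is map
theorem pvB_parts (cov : List Int) :
    (PySem.List.enumerate cov).foldl (fun parts p => parts ++ [pvPiece p.1 p.2]) []
      = (PySem.List.enumerate cov).map (fun p => pvPiece p.1 p.2) := by
  simpa using PySem.List.foldl_append_singleton_eq_map
    (l := PySem.List.enumerate cov) (f := fun p => pvPiece p.1 p.2) (acc := [])

theorem pvB_eq (cov : List Int) : (format_coverage_array_alt cov).toList = pvFmt cov := by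
  unfold format_coverage_array_alt
  rw [pvB_parts, PySem.Str.toList_join]
  have h0 : ("" : String).toList = [] := rfl
  rw [h0, pvJoin_nil_sep]
  have := pvB_main cov.length cov (le_refl _) 0
  simp only [Nat.cast_zero, mul_zero] at this
  simpa [List.map_map, Function.comp] using this

-- ===== A side =====

theorem pvRange8_nil (a b : Int) (h : b ≤ a) : PySem.List.pyRange a b 8 = [] := by
  rw [PySem.List.pyRange_of_pos a b (by norm_num)]
  simp [show ¬ a < b by omega]

theorem pvRange8_cons (a b : Int) (h : a < b) :
    PySem.List.pyRange a b 8 = a :: PySem.List.pyRange (a + 8) b 8 := by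
  rw [PySem.List.pyRange_of_pos a b (by norm_num),
      PySem.List.pyRange_of_pos (a + 8) b (by norm_num)]
  by_cases hc : a + 8 < b
  · have hm : (if a < b then ((b - a + 8 - 1) / 8).toNat else 0)
        = (if a + 8 < b then ((b - (a + 8) + 8 - 1) / 8).toNat else 0) + 1 := by
      simp [h, hc]; omega
    rw [hm, List.range_succ_eq_map]
    simp only [List.map_cons, List.map_map, Nat.cast_zero, mul_zero, add_zero]
    congr 1
    apply List.map_congr_left
    intro k _
    simp only [Function.comp, Nat.succ_eq_add_one]
    push_cast; ring
  · have hm1 : (if a < b then ((b - a + 8 - 1) / 8).toNat else 0) = 1 := by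
      simp [h]; omega
    rw [hm1]
    simp [hc]

theorem pvA_rows (cov : List Int) :
    (PySem.List.pyRange 0 (cov.length : Int) 8).foldl
      (fun rows i =>
        let row := PySem.List.slice cov (some i) (some (i + 8))
        if i + 8 < (cov.length : Int) then
          rows ++ [PySem.Str.join "," (row.map PySem.Int.toStr) ++ ","]
        else
          rows ++ [PySem.Str.join "," (row.map PySem.Int.toStr)]) []
    = (PySem.List.pyRange 0 (cov.length : Int) 8).map
        (fun i =>
          let row := PySem.List.slice cov (some i) (some (i + 8))
          if i + 8 < (cov.length : Int) then
            PySem.Str.join "," (row.map PySem.Int.toStr) ++ ","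
          else
            PySem.Str.join "," (row.map PySem.Int.toStr)) := by
  have hfun : (fun (rows : List String) (i : Int) =>
        let row := PySem.List.slice cov (some i) (some (i + 8))
        if i + 8 < (cov.length : Int) then
          rows ++ [PySem.Str.join "," (row.map PySem.Int.toStr) ++ ","]
        else
          rows ++ [PySem.Str.join "," (row.map PySem.Int.toStr)])
      = (fun rows i => rows ++
          [let row := PySem.List.slice cov (some i) (some (i + 8))
           if i + 8 < (cov.length : Int) then
             PySem.Str.join "," (row.map PySem.Int.toStr) ++ ","
           else
             PySem.Str.join "," (row.map PySem.Int.toStr)]) := by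
    funext rows i
    by_cases hc : i + 8 < (cov.length : Int) <;> simp [hc]
  rw [hfun]
  have := PySem.List.foldl_append_singleton_eq_map
    (f := fun i : Int =>
      if i + 8 < (cov.length : Int) then
        PySem.Str.join "," ((PySem.List.slice cov (some i) (some (i + 8))).map PySem.Int.toStr) ++ ","
      else
        PySem.Str.join "," ((PySem.List.slice cov (some i) (some (i + 8))).map PySem.Int.toStr))
    (l := PySem.List.pyRange 0 (cov.length : Int) 8) (acc := [])
  simpa using this

theorem pvRow_toList (row : List Int) :
    (PySem.Str.join "," (row.map PySem.Int.toStr)).toList = pvRowC row := by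
  rw [PySem.Str.toList_join, pvRowC]
  congr 1
  rw [List.map_map]
  apply List.map_congr_left
  intro v _
  simp [Function.comp, PySem.Int.toList_toStr]

theorem pvSlice8 (cov : List Int) (j : Nat) :
    PySem.List.slice cov (some ((8 * j : Nat) : Int)) (some (((8 * j : Nat) : Int) + 8))
      = (cov.drop (8 * j)).take 8 := by
  have : (((8 * j : Nat) : Int) + 8) = ((8 * j : Nat) : Int) + ((8 : Nat) : Int) := by push_cast; ring
  rw [this, PySem.List.slice_natCast_add]

-- A side, chunk-wise recursion over the start index 8*j
theorem pvA_main : ∀ (m : Nat) (cov : List Int) (j : Nat), cov.length ≤ 8 * j + m →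
    PySem.Chars.join ['\n']
      (((PySem.List.pyRange ((8 * j : Nat) : Int) (cov.length : Int) 8).map
        (fun i =>
          let row := PySem.List.slice cov (some i) (some (i + 8))
          if i + 8 < (cov.length : Int) then
            PySem.Str.join "," (row.map PySem.Int.toStr) ++ ","
          else
            PySem.Str.join "," (row.map PySem.Int.toStr))).map String.toList)
      = pvFmt (cov.drop (8 * j)) := by
  intro m
  induction m with
  | zero =>
    intro cov j hcov
    rw [pvRange8_nil _ _ (by exact_mod_cast hcov)]
    have : cov.drop (8 * j) = [] := List.drop_eq_nil_of_le (by omega)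
    rw [this]
    simp [PySem.Chars.join_nil, pvFmt_small, pvRowC]
  | succ m ih =>
    intro cov j hcov
    by_cases hlt : ((8 * j : Nat) : Int) < (cov.length : Int)
    · rw [pvRange8_cons _ _ hlt]
      simp only [List.map_cons]
      rw [pvSlice8]
      by_cases hc : ((8 * j : Nat) : Int) + 8 < (cov.length : Int)
      · -- not the last row
        have hcast : ((8 * j : Nat) : Int) + 8 = ((8 * (j + 1) : Nat) : Int) := by push_cast; ring
        have htail := ih cov (j + 1) (by omega)
        rw [hcast] at hc ⊢
        rw [if_pos hc]
        rw [pvRange8_cons _ _ hc] at htail ⊢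
        simp only [List.map_cons] at htail ⊢
        rw [PySem.Chars.join_cons_cons, htail]
        have hbig : ¬ (cov.drop (8 * j)).length ≤ 8 := by
          simp; omega
        rw [pvFmt_big _ hbig]
        have hdd : (cov.drop (8 * j)).drop 8 = cov.drop (8 * (j + 1)) := by
          rw [List.drop_drop]; congr 1
        rw [hdd]
        have hhead : (PySem.Str.join "," (((cov.drop (8 * j)).take 8).map PySem.Int.toStr) ++ ("," : String)).toList
            = pvRowC ((cov.drop (8 * j)).take 8) ++ [','] := by
          rw [String.toList_append, pvRow_toList]; rfl
        simp only [hhead]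
        simp
      · -- last row
        rw [pvRange8_nil _ _ (by omega)]
        simp only [List.map_nil, hc, if_neg, not_false_iff]
        have hsmall : (cov.drop (8 * j)).length ≤ 8 := by
          simp at hc ⊢; omega
        have htk : (cov.drop (8 * j)).take 8 = cov.drop (8 * j) := List.take_of_length_le hsmall
        rw [htk, PySem.Chars.join_singleton, pvRow_toList, pvFmt_small _ hsmall]
    · rw [pvRange8_nil _ _ (by omega)]
      have : cov.drop (8 * j) = [] := List.drop_eq_nil_of_le (by omega)
      rw [this]
      simp [PySem.Chars.join_nil, pvFmt_small, pvRowC]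

theorem pvA_eq (cov : List Int) : (format_coverage_array cov).toList = pvFmt cov := by
  unfold format_coverage_array
  dsimp only
  rw [pvA_rows, PySem.Str.toList_join]
  have := pvA_main cov.length cov 0 (by omega)
  simp only [Nat.mul_zero, Nat.cast_zero, List.drop_zero] at this
  simpa using this

-- ===== VERDICT (by name: the statement is the Claim_ definition above) =====
theorem format_coverage_array_spec : Claim_equal_format_coverage_array := by
  intro cov _
  unfold Spec_format_coverage_array
  apply String.toList_inj.mp
  rw [pvA_eq, pvB_eq]
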